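-- pv_equiv track=rewrite | github.com/metalift/metalift | tenspiler/python_dsl.py | matrix_elemwise_add
-- ===== SOURCE A (Python) =====
-- def vec_elemwise_add(x, y):
--     return (
--         []
--         if len(x) < 1 or not len(x) == len(y)
--         else [x[0] + y[0], *vec_elemwise_add(x[1:], y[1:])]
--     )
--
-- def matrix_elemwise_add(matrix_x, matrix_y):
--     return (
--         []
--         if len(matrix_x) < 1 or not len(matrix_x) == len(matrix_y)
--         else [
--             vec_elemwise_add(matrix_x[0], matrix_y[0]),
--             *matrix_elemwise_add(matrix_x[1:], matrix_y[1:]),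
--         ]
--     )
-- ===== SOURCE B (Python) =====
-- def matrix_elemwise_add(matrix_x, matrix_y):
--     if len(matrix_x) < 1 or len(matrix_x) != len(matrix_y):
--         return []
--     result = []
--     for rx, ry in zip(matrix_x, matrix_y):
--         if len(rx) < 1 or len(rx) != len(ry):
--             result.append([])
--         else:
--             result.append([a + b for a, b in zip(rx, ry)])
--     return result
-- ===== Notes on version B (the rewrite author's own statement) =====
-- stated objective: faster
-- what changed: Replaces two levels of head/tail recursion (with O(n^2) list slicing) by one iterative pass over zip(matrix_x, matrix_y) with an inner zip comprehension, keeping the outer and per-row mismatch guards.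
import Mathlib
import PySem

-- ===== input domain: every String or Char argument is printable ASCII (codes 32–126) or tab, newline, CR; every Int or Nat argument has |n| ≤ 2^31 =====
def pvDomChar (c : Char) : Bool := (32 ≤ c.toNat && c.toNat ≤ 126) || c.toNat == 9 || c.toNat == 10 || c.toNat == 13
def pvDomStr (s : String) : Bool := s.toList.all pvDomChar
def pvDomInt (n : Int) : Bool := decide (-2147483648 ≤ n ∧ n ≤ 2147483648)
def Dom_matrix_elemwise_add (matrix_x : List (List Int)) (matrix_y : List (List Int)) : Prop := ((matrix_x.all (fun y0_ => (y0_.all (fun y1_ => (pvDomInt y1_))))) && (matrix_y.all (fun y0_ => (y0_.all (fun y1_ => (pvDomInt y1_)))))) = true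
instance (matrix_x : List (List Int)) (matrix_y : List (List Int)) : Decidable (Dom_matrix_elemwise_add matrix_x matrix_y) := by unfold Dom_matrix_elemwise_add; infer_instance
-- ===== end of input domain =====

-- B replaces the double head/tail recursion of A by a single iterative pass over zip with an inner comprehension (faster: avoids repeated list slicing); same guards, same result.


-- ===== PORT A =====
def vec_elemwise_add (x : List Int) (y : List Int) : List Int :=
  if x.length < 1 ∨ x.length ≠ y.length then []
  else match x, y with
    | a :: xs, b :: ys => (a + b) :: vec_elemwise_add xs ys
    | _, _ => []
termination_by x.length
decreasing_by simp_all

def matrix_elemwise_add (matrix_x : List (List Int)) (matrix_y : List (List Int)) : List (List Int) :=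
  if matrix_x.length < 1 ∨ matrix_x.length ≠ matrix_y.length then []
  else match matrix_x, matrix_y with
    | r :: xs, s :: ys => vec_elemwise_add r s :: matrix_elemwise_add xs ys
    | _, _ => []
termination_by matrix_x.length
decreasing_by simp_all

-- ===== PORT B =====
def matrix_elemwise_add_alt (matrix_x : List (List Int)) (matrix_y : List (List Int)) : List (List Int) :=
  if matrix_x.length < 1 ∨ matrix_x.length ≠ matrix_y.length then []
  else (matrix_x.zip matrix_y).foldl
    (fun result p =>
      result ++ [if p.1.length < 1 ∨ p.1.length ≠ p.2.length then []
                 else (p.1.zip p.2).map (fun q => q.1 + q.2)]) []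

-- ===== PRECONDITION & SPEC =====
def Spec_matrix_elemwise_add (matrix_x : List (List Int)) (matrix_y : List (List Int)) (out : List (List Int)) : Prop := out = matrix_elemwise_add_alt matrix_x matrix_y
instance (matrix_x : List (List Int)) (matrix_y : List (List Int)) (out : List (List Int)) : Decidable (Spec_matrix_elemwise_add matrix_x matrix_y out) := by unfold Spec_matrix_elemwise_add; infer_instance

-- ===== CLAIM (what is proved, stated in full; the proofs are below) =====
def Claim_equal_matrix_elemwise_add : Prop := ∀ (matrix_x : List (List Int)) (matrix_y : List (List Int)), Dom_matrix_elemwise_add matrix_x matrix_y → Spec_matrix_elemwise_add matrix_x matrix_y (matrix_elemwise_add matrix_x matrix_y)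

-- ===== LEMMAS AND PROOFS =====

-- ===== VERDICT (by name: the statement is the Claim_ definition above) =====
lemma vec_eq (x y : List Int) :
    vec_elemwise_add x y =
      if x.length < 1 ∨ x.length ≠ y.length then [] else (x.zip y).map (fun q => q.1 + q.2) := by
  induction x generalizing y with
  | nil => simp [vec_elemwise_add]
  | cons a xs ih =>
    cases y with
    | nil => simp [vec_elemwise_add]
    | cons b ys =>
      by_cases h : (a :: xs).length < 1 ∨ (a :: xs).length ≠ (b :: ys).length
      · rw [vec_elemwise_add.eq_def, if_pos h, if_pos h]
      · rw [vec_elemwise_add.eq_def, if_neg h, if_neg h]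
        have h2 : xs.length = ys.length := by simp at h; omega
        simp [ih, h2]
        exact fun hy => Or.inr hy

lemma mat_eq (mx my : List (List Int)) (h : mx.length = my.length) :
    matrix_elemwise_add mx my =
      (mx.zip my).map (fun p => if p.1.length < 1 ∨ p.1.length ≠ p.2.length then []
                                else (p.1.zip p.2).map (fun q => q.1 + q.2)) := by
  induction mx generalizing my with
  | nil => simp [matrix_elemwise_add]
  | cons r xs ih =>
    cases my with
    | nil => simp at h
    | cons s ys =>
      simp at h
      have hg : ¬((r :: xs).length < 1 ∨ (r :: xs).length ≠ (s :: ys).length) := by simp [h]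
      rw [matrix_elemwise_add.eq_def, if_neg hg]
      simp [ih ys h, vec_eq]

theorem matrix_elemwise_add_spec : Claim_equal_matrix_elemwise_add := by
  intro mx my _
  unfold Spec_matrix_elemwise_add matrix_elemwise_add_alt
  by_cases h : mx.length < 1 ∨ mx.length ≠ my.length
  · rw [if_pos h, matrix_elemwise_add.eq_def, if_pos h]
  · rw [if_neg h, PySem.List.foldl_append_singleton_eq_map]
    have h2 : mx.length = my.length := by
      rcases not_or.mp h with ⟨_, h2⟩; exact not_not.mp h2
    exact mat_eq mx my h2
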